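-- pv_equiv track=rewrite | github.com/ioulasri/100-Days-of-Code-with-Python | leet_code_wars/Alternate Square Sum.py | alternate_sq_sum
-- ===== SOURCE A (Python) =====
-- def alternate_sq_sum(arr):
--     sum = 0
--     for i in range(len(arr)):
--         if i % 2 == 1:
--             sum += arr[i]**2
--         else:
--             sum += arr[i]
--     return sum
-- ===== SOURCE B (Python) =====
-- def alternate_sq_sum(arr):
--     total = 0
--     for j in range(0, len(arr) - 1, 2):
--         total += arr[j] + arr[j + 1] * arr[j + 1]
--     if len(arr) % 2 == 1:
--         total += arr[-1]
--     return total
-- ===== Notes on version B (the rewrite author's own statement) =====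
-- stated objective: alternative
-- what changed: Replaces the per-index parity test inside a full-length loop by a stride-2 loop that consumes an (even,odd) pair per iteration, with a single final fix-up for an odd-length tail.
import Mathlib
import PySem

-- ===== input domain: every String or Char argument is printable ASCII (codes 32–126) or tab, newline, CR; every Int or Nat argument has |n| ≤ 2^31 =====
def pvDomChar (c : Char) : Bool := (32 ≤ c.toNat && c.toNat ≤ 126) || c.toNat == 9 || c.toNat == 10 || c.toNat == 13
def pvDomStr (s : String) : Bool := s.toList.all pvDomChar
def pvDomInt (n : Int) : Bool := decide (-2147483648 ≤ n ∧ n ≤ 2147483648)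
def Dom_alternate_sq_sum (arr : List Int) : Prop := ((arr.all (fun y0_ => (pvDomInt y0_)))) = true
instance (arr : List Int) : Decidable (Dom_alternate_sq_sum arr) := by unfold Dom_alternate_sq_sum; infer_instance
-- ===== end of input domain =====

-- B replaces A's per-index parity test over range(len(arr)) by a stride-2 loop adding one
-- (even, odd) pair per iteration plus a final odd-length fix-up (objective: alternative).

-- ===== PORT A =====
def alternate_sq_sum (arr : List Int) : Int :=
  (PySem.List.pyRange 0 (arr.length : Int) 1).foldl
    (fun s i =>
      if PySem.Int.mod i 2 == 1 then s + (PySem.List.pyGetD arr i 0) ^ 2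
      else s + PySem.List.pyGetD arr i 0) 0

-- ===== PORT B =====
def alternate_sq_sum_alt (arr : List Int) : Int :=
  let total : Int :=
    (PySem.List.pyRange 0 ((arr.length : Int) - 1) 2).foldl
      (fun t j =>
        t + PySem.List.pyGetD arr j 0
          + PySem.List.pyGetD arr (j + 1) 0 * PySem.List.pyGetD arr (j + 1) 0) 0
  if PySem.Int.mod (arr.length : Int) 2 == 1 then total + PySem.List.pyGetD arr (-1) 0
  else total

-- ===== PRECONDITION & SPEC =====
def Spec_alternate_sq_sum (arr : List Int) (out : Int) : Prop := out = alternate_sq_sum_alt arr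
instance (arr : List Int) (out : Int) : Decidable (Spec_alternate_sq_sum arr out) := by unfold Spec_alternate_sq_sum; infer_instance

-- ===== CLAIM (what is proved, stated in full; the proofs are below) =====
def Claim_equal_alternate_sq_sum : Prop := ∀ (arr : List Int), Dom_alternate_sq_sum arr → Spec_alternate_sq_sum arr (alternate_sq_sum arr)

-- ===== LEMMAS AND PROOFS =====

-- Reference value: sum with odd positions squared, consumed two at a time.
def pairSum : List Int → Int
  | [] => 0
  | [x] => x
  | x :: y :: t => x + y * y + pairSum t

-- Pair part only (what B's loop computes; an odd trailing element contributes 0).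
def evenPairs : List Int → Int
  | [] => 0
  | [_] => 0
  | x :: y :: t => x + y * y + evenPairs t

theorem mod2_even {i : Int} (h : i % 2 = 0) : PySem.Int.mod i 2 = 0 :=
  (PySem.Int.mod_eq_zero_iff_dvd i 2).mpr (by omega)

theorem mod2_odd {i : Int} (h : i % 2 = 1) : PySem.Int.mod i 2 = 1 :=
  (PySem.Int.mod_two_eq i).resolve_left
    (fun h0 => by have := (PySem.Int.mod_eq_zero_iff_dvd i 2).mp h0; omega)

theorem mod2_add_two (n : Int) : PySem.Int.mod (n + 2) 2 = PySem.Int.mod n 2 := by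
  by_cases hd : (2:Int) ∣ n
  · rw [(PySem.Int.mod_eq_zero_iff_dvd n 2).mpr hd,
        (PySem.Int.mod_eq_zero_iff_dvd (n+2) 2).mpr (by omega)]
  · have h1 : PySem.Int.mod n 2 = 1 :=
      (PySem.Int.mod_two_eq n).resolve_left
        (fun h0 => hd ((PySem.Int.mod_eq_zero_iff_dvd n 2).mp h0))
    have h2 : PySem.Int.mod (n+2) 2 = 1 :=
      (PySem.Int.mod_two_eq (n+2)).resolve_left
        (fun h0 => by have := (PySem.Int.mod_eq_zero_iff_dvd (n+2) 2).mp h0; omega)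
    rw [h1, h2]

theorem pyGetD_head {arr t : List Int} {i x : Int} (h0 : 0 ≤ i)
    (h : arr.drop i.toNat = x :: t) : PySem.List.pyGetD arr i 0 = x := by
  have h1 : arr[i.toNat]? = some x := by
    have h2 : (arr.drop i.toNat)[0]? = arr[i.toNat + 0]? := List.getElem?_drop
    rw [h] at h2; simpa using h2.symm
  rw [PySem.List.pyGetD_of_nonneg arr 0 h0, List.getD_eq_getElem?_getD, h1]; rfl

theorem pyGetD_second {arr t : List Int} {i x y : Int} (h0 : 0 ≤ i)
    (h : arr.drop i.toNat = x :: y :: t) : PySem.List.pyGetD arr (i + 1) 0 = y := by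
  have h1 : arr[i.toNat + 1]? = some y := by
    have h2 : (arr.drop i.toNat)[1]? = arr[i.toNat + 1]? := List.getElem?_drop
    rw [h] at h2; simpa using h2.symm
  rw [PySem.List.pyGetD_of_nonneg arr 0 (by omega), List.getD_eq_getElem?_getD,
      show (i+1).toNat = i.toNat + 1 by omega, h1]; rfl

theorem pyGet_neg_one (l : List Int) (h : l ≠ []) :
    PySem.List.pyGet? l (-1) = l.getLast? := by
  have hl : 1 ≤ l.length := List.length_pos_iff.mpr h
  simp only [PySem.List.pyGet?, PySem.List.pyIdx?, List.getLast?_eq_getElem?]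
  rw [if_neg (by norm_num), if_pos (by omega)]
  simp

theorem pyGetD_neg_one_cons_cons (x y : Int) (t : List Int) (ht : t ≠ []) :
    PySem.List.pyGetD (x :: y :: t) (-1) 0 = PySem.List.pyGetD t (-1) 0 := by
  obtain ⟨z, t', rfl⟩ := List.exists_cons_of_ne_nil ht
  unfold PySem.List.pyGetD
  rw [pyGet_neg_one (x :: y :: z :: t') (by simp), pyGet_neg_one (z :: t') (by simp),
      List.getLast?_cons_cons, List.getLast?_cons_cons]

theorem pyRange_two_eq_nil {a b : Int} (h : b ≤ a) : PySem.List.pyRange a b 2 = [] := by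
  rw [PySem.List.pyRange_of_pos a b (by norm_num)]
  simp [show ¬ a < b by omega]

theorem pyRange_two_cons {a b : Int} (h : a < b) :
    PySem.List.pyRange a b 2 = a :: PySem.List.pyRange (a + 2) b 2 := by
  rw [PySem.List.pyRange_of_pos a b (by norm_num),
      PySem.List.pyRange_of_pos (a + 2) b (by norm_num)]
  have hc : (if a < b then ((b - a + 2 - 1) / 2).toNat else 0)
      = (if a + 2 < b then ((b - (a + 2) + 2 - 1) / 2).toNat else 0) + 1 := by
    split_ifs <;> omega
  rw [hc, List.range_succ_eq_map, List.map_cons, List.map_map]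
  refine List.cons_eq_cons.mpr ⟨by push_cast; ring, ?_⟩
  refine List.map_congr_left (fun k _ => ?_)
  simp only [Function.comp_apply, Nat.succ_eq_add_one]
  push_cast; ring

theorem A_loop (xs : List Int) : ∀ (arr : List Int) (i acc : Int), 0 ≤ i →
    arr.drop i.toNat = xs → i.toNat + xs.length = arr.length → i % 2 = 0 →
    (PySem.List.pyRange i (arr.length : Int) 1).foldl
      (fun s j =>
        if PySem.Int.mod j 2 == 1 then s + (PySem.List.pyGetD arr j 0) ^ 2
        else s + PySem.List.pyGetD arr j 0) acc = acc + pairSum xs := by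
  induction xs using pairSum.induct with
  | case1 =>
    intro arr i acc h0 hdrop hlen _
    rw [PySem.List.pyRange_one_eq_nil (by simp at hlen; omega)]
    simp [pairSum]
  | case2 x =>
    intro arr i acc h0 hdrop hlen hpar
    rw [PySem.List.pyRange_one_cons (by simp at hlen; omega),
        PySem.List.pyRange_one_eq_nil (by simp at hlen; omega)]
    simp only [List.foldl_cons, List.foldl_nil]
    have c1 : (PySem.Int.mod i 2 == 1) = false := by rw [mod2_even hpar]; rfl
    rw [c1, pyGetD_head h0 hdrop]
    simp only [Bool.false_eq_true, ite_false]
    simp [pairSum]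
  | case3 x y t ih =>
    intro arr i acc h0 hdrop hlen hpar
    have hlen' : i.toNat + t.length + 2 = arr.length := by simp at hlen; omega
    rw [PySem.List.pyRange_one_cons (a := i) (by omega),
        PySem.List.pyRange_one_cons (a := i + 1) (by omega)]
    simp only [List.foldl_cons]
    have c1 : (PySem.Int.mod i 2 == 1) = false := by rw [mod2_even hpar]; rfl
    have c2 : (PySem.Int.mod (i+1) 2 == 1) = true := by rw [mod2_odd (by omega)]; rfl
    rw [c1, c2, pyGetD_head h0 hdrop, pyGetD_second h0 hdrop]
    simp only [Bool.false_eq_true, if_true, ite_false]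
    have hdrop' : arr.drop (i + 2).toNat = t := by
      have h2 := congrArg (List.drop 2) hdrop
      simp only [List.drop_drop] at h2
      rw [show (i+2).toNat = i.toNat + 2 by omega]
      simpa using h2
    have := ih arr (i + 2) (acc + x + y ^ 2) (by omega) hdrop' (by omega) (by omega)
    rw [show i + 1 + 1 = i + 2 by ring, this, pairSum]
    ring

theorem B_loop (xs : List Int) : ∀ (arr : List Int) (i acc : Int), 0 ≤ i →
    arr.drop i.toNat = xs → i.toNat + xs.length = arr.length →
    (PySem.List.pyRange i ((arr.length : Int) - 1) 2).foldl
      (fun t j =>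
        t + PySem.List.pyGetD arr j 0
          + PySem.List.pyGetD arr (j + 1) 0 * PySem.List.pyGetD arr (j + 1) 0) acc
      = acc + evenPairs xs := by
  induction xs using evenPairs.induct with
  | case1 =>
    intro arr i acc h0 hdrop hlen
    rw [pyRange_two_eq_nil (by simp at hlen; omega)]
    simp [evenPairs]
  | case2 x =>
    intro arr i acc h0 hdrop hlen
    rw [pyRange_two_eq_nil (by simp at hlen; omega)]
    simp [evenPairs]
  | case3 x y t ih =>
    intro arr i acc h0 hdrop hlen
    have hlen' : i.toNat + t.length + 2 = arr.length := by simp at hlen; omega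
    rw [pyRange_two_cons (by omega)]
    simp only [List.foldl_cons]
    rw [pyGetD_head h0 hdrop, pyGetD_second h0 hdrop]
    have hdrop' : arr.drop (i + 2).toNat = t := by
      have h2 := congrArg (List.drop 2) hdrop
      simp only [List.drop_drop] at h2
      rw [show (i+2).toNat = i.toNat + 2 by omega]
      simpa using h2
    have := ih arr (i + 2) (acc + x + y * y) (by omega) hdrop' (by omega)
    rw [this, evenPairs]
    ring

theorem combine (arr : List Int) :
    (if PySem.Int.mod (arr.length : Int) 2 == 1
      then evenPairs arr + PySem.List.pyGetD arr (-1) 0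
      else evenPairs arr) = pairSum arr := by
  induction arr using pairSum.induct with
  | case1 => decide
  | case2 x =>
    rw [show ((([x] : List Int).length : Int)) = 1 by simp,
        show (PySem.Int.mod (1:Int) 2 == 1) = true by decide, if_pos rfl]
    simp [evenPairs, pairSum, PySem.List.pyGetD, PySem.List.pyGet?, PySem.List.pyIdx?]
  | case3 x y t ih =>
    rw [show (((x :: y :: t : List Int).length : Int)) = (t.length : Int) + 2 by simp; ring,
        mod2_add_two]
    by_cases hodd : PySem.Int.mod ((t.length : Int)) 2 = 1
    · have ht : t ≠ [] := by rintro rfl; revert hodd; decide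
      have hc : (PySem.Int.mod ((t.length:Int)) 2 == 1) = true := by rw [hodd]; rfl
      rw [hc, if_pos (show (true:Bool) = true from rfl)] at ih ⊢
      rw [pyGetD_neg_one_cons_cons x y t ht]
      simp only [evenPairs, pairSum] at ih ⊢
      omega
    · have hodd' : PySem.Int.mod ((t.length:Int)) 2 = 0 :=
        (PySem.Int.mod_two_eq _).resolve_right hodd
      have hc : (PySem.Int.mod ((t.length:Int)) 2 == 1) = false := by rw [hodd']; rfl
      rw [hc, if_neg (show ¬((false:Bool) = true) by simp)] at ih ⊢
      simp only [evenPairs, pairSum] at ih ⊢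
      omega

theorem A_main (arr : List Int) : alternate_sq_sum arr = pairSum arr := by
  have := A_loop arr arr 0 0 (by norm_num) (by simp) (by simp) (by decide)
  simpa [alternate_sq_sum] using this

theorem B_main (arr : List Int) : alternate_sq_sum_alt arr = pairSum arr := by
  have hb := B_loop arr arr 0 0 (le_refl 0) (by simp) (by simp)
  rw [alternate_sq_sum_alt]
  simp only [hb, zero_add]
  exact combine arr

-- ===== VERDICT (by name: the statement is the Claim_ definition above) =====
theorem alternate_sq_sum_spec : Claim_equal_alternate_sq_sum := by
  intro arr _
  unfold Spec_alternate_sq_sum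
  rw [A_main, B_main]
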